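-- pv_equiv track=rewrite | github.com/dataengineerankur/PATCHIT-Auto-Remediation-Observability-Agent | patchit/verify/sandbox.py | _canonicalize_diff_paths
-- ===== SOURCE A (Python) =====
-- def _canonicalize_diff_paths(diff: str) -> str:
--     if not diff:
--         return diff
--     repls = [
--         ("a/repo/airflow/dags/extra_dags/", "a/repo/airflow_extra_dags/"),
--         ("b/repo/airflow/dags/extra_dags/", "b/repo/airflow_extra_dags/"),
--         ("--- a/repo/airflow/dags/extra_dags/", "--- a/repo/airflow_extra_dags/"),
--         ("+++ b/repo/airflow/dags/extra_dags/", "+++ b/repo/airflow_extra_dags/"),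
--         ("diff --git a/repo/airflow/dags/extra_dags/", "diff --git a/repo/airflow_extra_dags/"),
--         (" b/repo/airflow/dags/extra_dags/", " b/repo/airflow_extra_dags/"),
--     ]
--     out = diff
--     for a, b in repls:
--         out = out.replace(a, b)
--     return out
-- ===== SOURCE B (Python) =====
-- def _canonicalize_diff_paths(diff: str) -> str:
--     # Single left-to-right scan: at each position, if an "a/..." or "b/..." old
--     # path prefix starts here, emit the rewritten prefix and jump past it;
--     # otherwise copy one character.
--     TAIL = "/repo/airflow/dags/extra_dags/"
--     NEW_TAIL = "/repo/airflow_extra_dags/"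
--     out = []
--     i = 0
--     n = len(diff)
--     step = 1 + len(TAIL)
--     while i < n:
--         c = diff[i]
--         if (c == "a" or c == "b") and diff.startswith(TAIL, i + 1):
--             out.append(c)
--             out.append(NEW_TAIL)
--             i += step
--         else:
--             out.append(c)
--             i += 1
--     return "".join(out)
-- ===== Notes on version B (the rewrite author's own statement) =====
-- stated objective: alternative
-- what changed: B makes a single left-to-right scan that rewrites each occurrence of the old path prefix in place, instead of A's six sequential str.replace passes over the whole string (four of which are dead no-ops).
import Mathlib
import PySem

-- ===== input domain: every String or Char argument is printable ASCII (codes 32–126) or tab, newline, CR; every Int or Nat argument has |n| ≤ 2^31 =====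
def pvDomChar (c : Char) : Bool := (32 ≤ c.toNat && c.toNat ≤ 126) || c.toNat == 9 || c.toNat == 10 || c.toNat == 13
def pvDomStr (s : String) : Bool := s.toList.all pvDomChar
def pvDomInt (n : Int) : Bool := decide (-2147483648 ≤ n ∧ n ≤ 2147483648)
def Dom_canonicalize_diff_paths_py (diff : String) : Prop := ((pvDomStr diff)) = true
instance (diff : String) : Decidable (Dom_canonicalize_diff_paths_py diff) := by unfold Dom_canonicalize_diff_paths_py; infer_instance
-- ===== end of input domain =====

-- B replaces A's six sequential str.replace passes by one single left-to-right scan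
-- that rewrites each "a/…" / "b/…" old path prefix in place (objective: alternative,
-- single pass; same return value).

-- ===== PORT A =====
def pvRepls : List (String × String) := [
  ("a/repo/airflow/dags/extra_dags/", "a/repo/airflow_extra_dags/"),
  ("b/repo/airflow/dags/extra_dags/", "b/repo/airflow_extra_dags/"),
  ("--- a/repo/airflow/dags/extra_dags/", "--- a/repo/airflow_extra_dags/"),
  ("+++ b/repo/airflow/dags/extra_dags/", "+++ b/repo/airflow_extra_dags/"),
  ("diff --git a/repo/airflow/dags/extra_dags/", "diff --git a/repo/airflow_extra_dags/"),
  (" b/repo/airflow/dags/extra_dags/", " b/repo/airflow_extra_dags/")]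

def canonicalize_diff_paths_py (diff : String) : String :=
  if diff = "" then diff
  else pvRepls.foldl (fun out ab => PySem.Str.replace out ab.1 ab.2) diff

-- ===== PORT B =====
def pvTail : List Char := "/repo/airflow/dags/extra_dags/".toList
def pvNew : List Char := "/repo/airflow_extra_dags/".toList

def pvAltGo : List Char → List Char
  | [] => []
  | c :: t =>
    if (c = 'a' ∨ c = 'b') ∧ pvTail.isPrefixOf t then
      c :: (pvNew ++ pvAltGo (t.drop pvTail.length))
    else
      c :: pvAltGo t
termination_by l => l.length
decreasing_by all_goals simp [List.length_drop]; try omega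

def canonicalize_diff_paths_py_alt (diff : String) : String :=
  String.ofList (pvAltGo diff.toList)

-- ===== PRECONDITION & SPEC =====
def Spec_canonicalize_diff_paths_py (diff : String) (out : String) : Prop := out = canonicalize_diff_paths_py_alt diff
instance (diff : String) (out : String) : Decidable (Spec_canonicalize_diff_paths_py diff out) := by unfold Spec_canonicalize_diff_paths_py; infer_instance

-- ===== CLAIM (what is proved, stated in full; the proofs are below) =====
def Claim_equal_canonicalize_diff_paths_py : Prop := ∀ (diff : String), Dom_canonicalize_diff_paths_py diff → Spec_canonicalize_diff_paths_py diff (canonicalize_diff_paths_py diff)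

-- ===== LEMMAS AND PROOFS =====
def pvRep (p0 : Char) (pt r : List Char) : List Char → List Char
  | [] => []
  | c :: t =>
    if c = p0 ∧ pt.isPrefixOf t then r ++ pvRep p0 pt r (t.drop pt.length)
    else c :: pvRep p0 pt r t
termination_by l => l.length
decreasing_by all_goals simp [List.length_drop]; try omega

theorem pvRep_go (p0 : Char) (pt r : List Char) :
    ∀ (fuel : Nat) (l acc : List Char), l.length ≤ fuel →
      PySem.Chars.replace.go (p0 :: pt) r fuel l acc = acc.reverse ++ pvRep p0 pt r l := by
  intro fuel
  induction fuel with
  | zero =>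
    intro l acc h
    have hl : l = [] := List.eq_nil_of_length_eq_zero (Nat.le_zero.mp h)
    subst hl
    rw [PySem.Chars.replace.go]
    simp [pvRep]
  | succ n ih =>
    intro l acc h
    cases l with
    | nil =>
      rw [PySem.Chars.replace.go] <;> simp [pvRep]
    | cons c t =>
      rw [PySem.Chars.replace.go]
      by_cases hp : (p0 :: pt).isPrefixOf (c :: t)
      · rw [if_pos hp]
        have hlen : ((c :: t).drop (p0 :: pt).length).length ≤ n := by
          simp at h ⊢; omega
        rw [ih _ _ hlen]
        have hc : c = p0 ∧ pt.isPrefixOf t := by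
          rw [List.isPrefixOf_cons₂] at hp
          simp only [Bool.and_eq_true, beq_iff_eq] at hp
          exact ⟨hp.1.symm, hp.2⟩
        rw [pvRep, if_pos hc]
        simp [List.drop_succ_cons]
      · rw [if_neg hp]
        have hlen : t.length ≤ n := by simp at h; omega
        rw [ih _ _ hlen]
        have hc : ¬ (c = p0 ∧ pt.isPrefixOf t) := by
          intro hcc
          exact hp (by rw [List.isPrefixOf_cons₂]; simp [hcc.1, hcc.2])
        rw [pvRep, if_neg hc]
        simp

theorem replace_eq_pvRep (p0 : Char) (pt r s : List Char) :
    PySem.Chars.replace s (p0 :: pt) r = pvRep p0 pt r s := by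
  rw [PySem.Chars.replace]
  simp only [List.isEmpty_cons, Bool.false_eq_true, if_false]
  simpa using pvRep_go p0 pt r s.length s [] (le_refl _)

def pvNoOcc (p x : List Char) : Prop := ∀ s, s <:+ x → ¬ p <+: s

def pvSep (p q : List Char) : Bool :=
  q.tails.all fun s => s.isEmpty || (!(List.isPrefixOf s p) && !(List.isPrefixOf p s))

theorem pvSep_elim (p q s : List Char) (h : pvSep p q = true) (hs : s <:+ q) (hne : s ≠ []) :
    ¬ s <+: p ∧ ¬ p <+: s := by
  have h2 := List.all_eq_true.mp h s ((List.mem_tails s q).mpr hs)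
  simp only [List.isEmpty_iff, Bool.or_eq_true, Bool.and_eq_true, Bool.not_eq_true'] at h2
  rcases h2 with h1 | h1
  · exact absurd h1 hne
  · constructor
    · intro hc; rw [List.isPrefixOf_iff_prefix.mpr hc] at h1; exact absurd h1.1 (by simp)
    · intro hc; rw [List.isPrefixOf_iff_prefix.mpr hc] at h1; exact absurd h1.2 (by simp)

theorem pvSep_no_prefix (p q x : List Char) (h : pvSep p q = true)
    (q' : List Char) (hq : q' <:+ q) (hne : q' ≠ []) : ¬ p <+: (q' ++ x) := by
  intro hp
  have h2 := pvSep_elim p q q' h hq hne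
  rcases List.prefix_or_prefix_of_prefix hp (List.prefix_append q' x) with h1 | h1
  · exact h2.2 h1
  · exact h2.1 h1

theorem pvSep_suffix (p q q' : List Char) (h : pvSep p q = true) (hq : q' <:+ q) :
    pvSep p q' = true := by
  refine List.all_eq_true.mpr fun s hs => ?_
  exact List.all_eq_true.mp h s ((List.mem_tails s q).mpr (((List.mem_tails s q').mp hs).trans hq))

theorem pvRep_append_not_mem (p0 : Char) (pt r q x : List Char) (h : p0 ∉ q) :
    pvRep p0 pt r (q ++ x) = q ++ pvRep p0 pt r x := by
  induction q with
  | nil => simp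
  | cons d q' ih =>
    have hcnot : ¬ (d = p0 ∧ pt.isPrefixOf (q' ++ x)) := by
      intro hc; exact h (hc.1 ▸ List.mem_cons_self)
    rw [List.cons_append, pvRep, if_neg hcnot, ih (fun hm => h (List.mem_cons_of_mem d hm))]
    simp

theorem pvRep_append_sep (p0 : Char) (pt r q x : List Char) (h : pvSep (p0 :: pt) q = true) :
    pvRep p0 pt r (q ++ x) = q ++ pvRep p0 pt r x := by
  induction q with
  | nil => simp
  | cons d q' ih =>
    have hcnot : ¬ (d = p0 ∧ pt.isPrefixOf (q' ++ x)) := by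
      intro hc
      refine pvSep_no_prefix (p0 :: pt) (d :: q') x h (d :: q') (List.suffix_refl _) (by simp) ?_
      exact List.cons_prefix_cons.mpr ⟨hc.1.symm, List.isPrefixOf_iff_prefix.mp hc.2⟩
    rw [List.cons_append, pvRep, if_neg hcnot, ih (pvSep_suffix _ _ _ h (List.suffix_cons d q'))]
    simp

theorem pvRep_id (p0 : Char) (pt r x : List Char) (h : pvNoOcc (p0 :: pt) x) :
    pvRep p0 pt r x = x := by
  induction x with
  | nil => simp [pvRep]
  | cons c t ih =>
    have hcnot : ¬ (c = p0 ∧ pt.isPrefixOf t) := by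
      intro hc
      exact h (c :: t) (List.suffix_refl _)
        (List.cons_prefix_cons.mpr ⟨hc.1.symm, List.isPrefixOf_iff_prefix.mp hc.2⟩)
    rw [pvRep, if_neg hcnot, ih (fun s hs hp => h s (hs.trans (List.suffix_cons c t)) hp)]

theorem pvNoOcc_pre (pre p x : List Char) (h : pvNoOcc p x) : pvNoOcc (pre ++ p) x := by
  intro s hs hp
  obtain ⟨w, hw⟩ := hp
  have hdrop : p <+: s.drop pre.length := by
    rw [← hw, List.append_assoc, List.drop_left]
    exact List.prefix_append p w
  exact h _ ((List.drop_suffix _ _).trans hs) hdrop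

theorem pvNoOcc_append (p q x : List Char) (hx : pvNoOcc p x) (hs : pvSep p q = true) :
    pvNoOcc p (q ++ x) := by
  intro s hsuf hp
  rcases List.suffix_or_suffix_of_suffix hsuf (List.suffix_append q x) with h1 | h1
  · exact hx s h1 hp
  · obtain ⟨q', rfl⟩ := h1
    rcases eq_or_ne q' [] with rfl | hne
    · exact hx x (List.suffix_refl x) (by simpa using hp)
    · obtain ⟨w, hw⟩ := hsuf
      rw [← List.append_assoc] at hw
      have hq' : q' <:+ q := ⟨w, List.append_cancel_right hw⟩
      exact pvSep_no_prefix p q x hs q' hq' hne hp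

theorem pvTail_len : pvTail.length = 30 := by decide

theorem pvF1 : ∀ k, k < 30 →
    ¬(pvTail.drop k <+: ('a' :: pvNew)) ∧ ¬(('a' :: pvNew) <+: pvTail.drop k) := by decide

theorem pvF2 : ∀ k, (h : k < 30) → (pvTail[k]'(by rw [pvTail_len]; exact h) = 'a' ∨ pvTail[k]'(by rw [pvTail_len]; exact h) = 'b') →
    ¬(pvTail.drop (k+1) <+: pvNew) ∧ ¬(pvNew <+: pvTail.drop (k+1)) := by decide

theorem pvRep_tail_prefix : ∀ (n : Nat) (t : List Char), t.length ≤ n →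
    ∀ k, k < pvTail.length → pvTail.drop k <+: pvRep 'a' pvTail ('a' :: pvNew) t →
      pvTail.drop k <+: t := by
  intro n
  induction n with
  | zero =>
    intro t ht k hk hp
    have hn : t = [] := List.eq_nil_of_length_eq_zero (Nat.le_zero.mp ht)
    subst hn
    simp [pvRep] at hp
    rw [pvTail_len] at hp hk
    omega
  | succ n ih =>
    intro t ht k hk hp
    cases t with
    | nil =>
      simp [pvRep] at hp
      rw [pvTail_len] at hp hk
      omega
    | cons c t' =>
      have hS : pvTail.drop k = pvTail[k]'(by omega) :: pvTail.drop (k+1) :=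
        List.drop_eq_getElem_cons hk
      by_cases hc : c = 'a' ∧ pvTail.isPrefixOf t'
      · rw [pvRep, if_pos hc] at hp
        rw [pvTail_len] at hk
        rcases List.prefix_or_prefix_of_prefix hp (List.prefix_append _ _) with h1 | h1
        · exact absurd h1 (pvF1 k hk).1
        · exact absurd h1 (pvF1 k hk).2
      · rw [pvRep, if_neg hc] at hp
        rw [hS] at hp
        obtain ⟨hc1, hp'⟩ := List.cons_prefix_cons.mp hp
        rcases eq_or_lt_of_le (Nat.succ_le_of_lt hk) with heq | hlt
        · have hnil : pvTail.drop (k+1) = [] := List.drop_eq_nil_of_le (le_of_eq heq.symm)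
          rw [hS, hnil, hc1]
          exact List.cons_prefix_cons.mpr ⟨rfl, List.nil_prefix⟩
        · have := ih t' (by simp at ht; omega) (k+1) hlt hp'
          rw [hS, hc1]
          exact List.cons_prefix_cons.mpr ⟨rfl, this⟩

theorem pvAltGo_tail_prefix : ∀ (n : Nat) (t : List Char), t.length ≤ n →
    ∀ k, k < pvTail.length → pvTail.drop k <+: pvAltGo t → pvTail.drop k <+: t := by
  intro n
  induction n with
  | zero =>
    intro t ht k hk hp
    have hn : t = [] := List.eq_nil_of_length_eq_zero (Nat.le_zero.mp ht)
    subst hn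
    simp [pvAltGo] at hp
    rw [pvTail_len] at hp hk
    omega
  | succ n ih =>
    intro t ht k hk hp
    cases t with
    | nil =>
      simp [pvAltGo] at hp
      rw [pvTail_len] at hp hk
      omega
    | cons c t' =>
      have hS : pvTail.drop k = pvTail[k]'(by omega) :: pvTail.drop (k+1) :=
        List.drop_eq_getElem_cons hk
      by_cases hc : (c = 'a' ∨ c = 'b') ∧ pvTail.isPrefixOf t'
      · rw [pvAltGo, if_pos hc] at hp
        rw [hS] at hp
        obtain ⟨hc1, hp'⟩ := List.cons_prefix_cons.mp hp
        rcases eq_or_lt_of_le (Nat.succ_le_of_lt hk) with heq | hlt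
        · have hnil : pvTail.drop (k+1) = [] := List.drop_eq_nil_of_le (le_of_eq heq.symm)
          rw [hS, hnil, hc1]
          exact List.cons_prefix_cons.mpr ⟨rfl, List.nil_prefix⟩
        · exfalso
          rw [pvTail_len] at hk hlt
          have hab : pvTail[k]'(by rw [pvTail_len]; exact hk) = 'a' ∨ pvTail[k]'(by rw [pvTail_len]; exact hk) = 'b' := by
            rw [hc1]; exact hc.1
          rcases List.prefix_or_prefix_of_prefix hp' (List.prefix_append _ _) with h1 | h1
          · exact (pvF2 k hk hab).1 h1
          · exact (pvF2 k hk hab).2 h1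
      · rw [pvAltGo, if_neg hc] at hp
        rw [hS] at hp
        obtain ⟨hc1, hp'⟩ := List.cons_prefix_cons.mp hp
        rcases eq_or_lt_of_le (Nat.succ_le_of_lt hk) with heq | hlt
        · have hnil : pvTail.drop (k+1) = [] := List.drop_eq_nil_of_le (le_of_eq heq.symm)
          rw [hS, hnil, hc1]
          exact List.cons_prefix_cons.mpr ⟨rfl, List.nil_prefix⟩
        · have := ih t' (by simp at ht; omega) (k+1) hlt hp'
          rw [hS, hc1]
          exact List.cons_prefix_cons.mpr ⟨rfl, this⟩

theorem pvSepAT : pvSep ('a' :: pvTail) pvTail = true := by decide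
theorem pvSepAA : pvSep ('a' :: pvTail) ('a' :: pvNew) = true := by decide
theorem pvSepAB : pvSep ('a' :: pvTail) ('b' :: pvNew) = true := by decide
theorem pvSepBA : pvSep ('b' :: pvTail) ('a' :: pvNew) = true := by decide
theorem pvSepBB : pvSep ('b' :: pvTail) ('b' :: pvNew) = true := by decide

theorem pvRep_two : ∀ (n : Nat) (t : List Char), t.length ≤ n →
    pvRep 'b' pvTail ('b' :: pvNew) (pvRep 'a' pvTail ('a' :: pvNew) t) = pvAltGo t := by
  intro n
  induction n with
  | zero =>
    intro t ht
    have hn : t = [] := List.eq_nil_of_length_eq_zero (Nat.le_zero.mp ht)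
    subst hn
    simp [pvRep, pvAltGo]
  | succ n ih =>
    intro t ht
    cases t with
    | nil => simp [pvRep, pvAltGo]
    | cons c t' =>
      by_cases hA : c = 'a' ∧ pvTail.isPrefixOf t'
      · rw [pvRep, if_pos hA,
            pvRep_append_not_mem 'b' pvTail ('b' :: pvNew) ('a' :: pvNew) _ (by decide),
            ih _ (by simp at ht; rw [List.length_drop]; omega),
            pvAltGo, if_pos ⟨Or.inl hA.1, hA.2⟩, hA.1]
        simp
      · by_cases hB : c = 'b' ∧ pvTail.isPrefixOf t'
        · obtain ⟨t'', rfl⟩ := List.isPrefixOf_iff_prefix.mp hB.2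
          have hlen : t''.length ≤ n := by
            simp [pvTail_len] at ht ⊢; omega
          rw [pvRep, if_neg hA, pvRep_append_sep 'a' pvTail ('a' :: pvNew) pvTail _ pvSepAT,
              pvRep, if_pos ⟨hB.1, List.isPrefixOf_iff_prefix.mpr (List.prefix_append pvTail _)⟩,
              List.drop_left, ih t'' hlen,
              pvAltGo, if_pos ⟨Or.inr hB.1, List.isPrefixOf_iff_prefix.mpr (List.prefix_append pvTail _)⟩,
              List.drop_left, hB.1]
          simp
        · have hlen : t'.length ≤ n := by simp at ht; omega
          rw [pvRep, if_neg hA]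
          have houter : ¬ (c = 'b' ∧ pvTail.isPrefixOf (pvRep 'a' pvTail ('a' :: pvNew) t')) := by
            intro hc
            have hpre : pvTail <+: pvRep 'a' pvTail ('a' :: pvNew) t' := by
              simpa using List.isPrefixOf_iff_prefix.mp hc.2
            have := pvRep_tail_prefix n t' hlen 0 (by rw [pvTail_len]; omega)
              (by simpa using hpre)
            exact hB ⟨hc.1, List.isPrefixOf_iff_prefix.mpr (by simpa using this)⟩
          rw [pvRep, if_neg houter, ih t' hlen, pvAltGo, if_neg (by
            intro hc
            rcases hc.1 with h1 | h1
            · exact hA ⟨h1, hc.2⟩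
            · exact hB ⟨h1, hc.2⟩)]

theorem pvNoOcc_nil (p0 : Char) (pt : List Char) : pvNoOcc (p0 :: pt) [] := by
  intro s hs hp
  rw [List.suffix_nil.mp hs] at hp
  simpa using List.prefix_nil.mp hp

theorem pvAltGo_noOcc : ∀ (n : Nat) (t : List Char), t.length ≤ n →
    pvNoOcc ('a' :: pvTail) (pvAltGo t) ∧ pvNoOcc ('b' :: pvTail) (pvAltGo t) := by
  intro n
  induction n with
  | zero =>
    intro t ht
    have hn : t = [] := List.eq_nil_of_length_eq_zero (Nat.le_zero.mp ht)
    subst hn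
    rw [show pvAltGo [] = [] from by simp [pvAltGo]]
    exact ⟨pvNoOcc_nil _ _, pvNoOcc_nil _ _⟩
  | succ n ih =>
    intro t ht
    cases t with
    | nil =>
      rw [show pvAltGo [] = [] from by simp [pvAltGo]]
      exact ⟨pvNoOcc_nil _ _, pvNoOcc_nil _ _⟩
    | cons c t' =>
      by_cases hc : (c = 'a' ∨ c = 'b') ∧ pvTail.isPrefixOf t'
      · have hrw : pvAltGo (c :: t') = (c :: pvNew) ++ pvAltGo (t'.drop pvTail.length) := by
          rw [pvAltGo, if_pos hc]; simp
        have hX := ih (t'.drop pvTail.length) (by simp at ht ⊢; omega)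
        rw [hrw]
        rcases hc.1 with h1 | h1 <;> subst h1
        · exact ⟨pvNoOcc_append _ _ _ hX.1 pvSepAA, pvNoOcc_append _ _ _ hX.2 pvSepBA⟩
        · exact ⟨pvNoOcc_append _ _ _ hX.1 pvSepAB, pvNoOcc_append _ _ _ hX.2 pvSepBB⟩
      · have hX := ih t' (by simp at ht; omega)
        rw [pvAltGo, if_neg hc]
        have key : ∀ p0 : Char, (p0 = 'a' ∨ p0 = 'b') → ¬ (p0 :: pvTail) <+: c :: pvAltGo t' := by
          intro p0 hp0 hp
          obtain ⟨hc1, hp'⟩ := List.cons_prefix_cons.mp hp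
          have hT : pvTail <+: pvAltGo t' := hp'
          have := pvAltGo_tail_prefix n t' (by simp at ht; omega) 0
            (by rw [pvTail_len]; omega) (by simpa using hT)
          exact hc ⟨by rw [← hc1]; exact hp0, List.isPrefixOf_iff_prefix.mpr (by simpa using this)⟩
        constructor <;>
        · intro s hs hp
          rcases List.suffix_cons_iff.mp hs with rfl | hs'
          · first
            | exact key 'a' (Or.inl rfl) hp
            | exact key 'b' (Or.inr rfl) hp
          · first
            | exact hX.1 s hs' hp
            | exact hX.2 s hs' hp

def pvT3 : List Char := "-- a/repo/airflow/dags/extra_dags/".toList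
def pvT4 : List Char := "++ b/repo/airflow/dags/extra_dags/".toList
def pvT5 : List Char := "iff --git a/repo/airflow/dags/extra_dags/".toList
def pvT6 : List Char := "b/repo/airflow/dags/extra_dags/".toList

-- ===== VERDICT (by name: the statement is the Claim_ definition above) =====
theorem canonicalize_diff_paths_py_spec : Claim_equal_canonicalize_diff_paths_py := by
  intro diff _
  unfold Spec_canonicalize_diff_paths_py canonicalize_diff_paths_py canonicalize_diff_paths_py_alt
  by_cases hd : diff = ""
  · subst hd
    rw [if_pos rfl, show ("" : String).toList = [] from by decide,
        show pvAltGo [] = [] from by simp [pvAltGo]]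
  · rw [if_neg hd]
    simp only [pvRepls, List.foldl_cons, List.foldl_nil]
    simp only [PySem.Str.replace, String.toList_ofList]
    rw [show ("a/repo/airflow/dags/extra_dags/" : String).toList = 'a' :: pvTail from by decide,
        show ("b/repo/airflow/dags/extra_dags/" : String).toList = 'b' :: pvTail from by decide,
        show ("--- a/repo/airflow/dags/extra_dags/" : String).toList = '-' :: pvT3 from by decide,
        show ("+++ b/repo/airflow/dags/extra_dags/" : String).toList = '+' :: pvT4 from by decide,
        show ("diff --git a/repo/airflow/dags/extra_dags/" : String).toList = 'd' :: pvT5 from by decide,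
        show (" b/repo/airflow/dags/extra_dags/" : String).toList = ' ' :: pvT6 from by decide,
        show ("a/repo/airflow_extra_dags/" : String).toList = 'a' :: pvNew from by decide,
        show ("b/repo/airflow_extra_dags/" : String).toList = 'b' :: pvNew from by decide,
        replace_eq_pvRep, replace_eq_pvRep, replace_eq_pvRep, replace_eq_pvRep,
        replace_eq_pvRep, replace_eq_pvRep,
        pvRep_two diff.toList.length diff.toList (le_refl _)]
    have hno := pvAltGo_noOcc diff.toList.length diff.toList (le_refl _)
    have n3 : pvNoOcc ('-' :: pvT3) (pvAltGo diff.toList) := by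
      rw [show ('-' :: pvT3) = "--- ".toList ++ ('a' :: pvTail) from by decide]
      exact pvNoOcc_pre _ _ _ hno.1
    have n4 : pvNoOcc ('+' :: pvT4) (pvAltGo diff.toList) := by
      rw [show ('+' :: pvT4) = "+++ ".toList ++ ('b' :: pvTail) from by decide]
      exact pvNoOcc_pre _ _ _ hno.2
    have n5 : pvNoOcc ('d' :: pvT5) (pvAltGo diff.toList) := by
      rw [show ('d' :: pvT5) = "diff --git ".toList ++ ('a' :: pvTail) from by decide]
      exact pvNoOcc_pre _ _ _ hno.1
    have n6 : pvNoOcc (' ' :: pvT6) (pvAltGo diff.toList) := by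
      rw [show (' ' :: pvT6) = [' '] ++ ('b' :: pvTail) from by decide]
      exact pvNoOcc_pre _ _ _ hno.2
    rw [pvRep_id _ _ _ _ n3, pvRep_id _ _ _ _ n4, pvRep_id _ _ _ _ n5, pvRep_id _ _ _ _ n6]
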